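-- pv_equiv track=rewrite | github.com/deepakgupta82/migration-mvp | backend/app/core/diagramming_agent.py | _group_components_by_layer
-- ===== SOURCE A (Python) =====
-- from typing import Dict, Any
--
-- def _group_components_by_layer(components: list) -> Dict[str, list]:
--     """Group components by their layer/type"""
--     layers = {
--         "Frontend": [],
--         "Backend": [],
--         "Database": [],
--         "Storage": [],
--         "Network": [],
--         "Security": [],
--         "Other": []
--     }
--
--     for comp in components:
--         comp_type = comp.get("type", "").lower()
--         layer = comp.get("layer", "").lower()
--
--         if "frontend" in comp_type or "web" in comp_type or "ui" in comp_type: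
--             layers["Frontend"].append(comp)
--         elif "backend" in comp_type or "api" in comp_type or "service" in comp_type:
--             layers["Backend"].append(comp)
--         elif "database" in comp_type or "db" in comp_type or "data" in comp_type:
--             layers["Database"].append(comp)
--         elif "storage" in comp_type or "file" in comp_type or "blob" in comp_type:
--             layers["Storage"].append(comp)
--         elif "network" in comp_type or "load" in comp_type or "gateway" in comp_type:
--             layers["Network"].append(comp)
--         elif "security" in comp_type or "auth" in comp_type or "firewall" in comp_type:
--             layers["Security"].append(comp)
--         else:
--             layers["Other"].append(comp)
--
--     # Remove empty layers
--     return {k: v for k, v in layers.items() if v}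
-- ===== SOURCE B (Python) =====
-- _LAYER_TABLE = [
--     ("Frontend", ("frontend", "web", "ui")),
--     ("Backend", ("backend", "api", "service")),
--     ("Database", ("database", "db", "data")),
--     ("Storage", ("storage", "file", "blob")),
--     ("Network", ("network", "load", "gateway")),
--     ("Security", ("security", "auth", "firewall")),
-- ]
--
--
-- def _classify(comp):
--     comp_type = comp.get("type", "").lower()
--     for name, keywords in _LAYER_TABLE:
--         if any(k in comp_type for k in keywords):
--             return name
--     return "Other"
--
--
-- def _group_components_by_layer(components: list):
--     result = {}
--     for name in [n for n, _ in _LAYER_TABLE] + ["Other"]: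
--         bucket = [c for c in components if _classify(c) == name]
--         if bucket:
--             result[name] = bucket
--     return result
-- ===== Notes on version B (the rewrite author's own statement) =====
-- stated objective: alternative
-- what changed: Replaces A's single pass that appends each component into a pre-built dict of seven buckets via an if/elif keyword chain with a table-driven classifier (ordered (layer, keywords) list) plus one filter pass per layer that builds the output directly in layer order.
import Mathlib
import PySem

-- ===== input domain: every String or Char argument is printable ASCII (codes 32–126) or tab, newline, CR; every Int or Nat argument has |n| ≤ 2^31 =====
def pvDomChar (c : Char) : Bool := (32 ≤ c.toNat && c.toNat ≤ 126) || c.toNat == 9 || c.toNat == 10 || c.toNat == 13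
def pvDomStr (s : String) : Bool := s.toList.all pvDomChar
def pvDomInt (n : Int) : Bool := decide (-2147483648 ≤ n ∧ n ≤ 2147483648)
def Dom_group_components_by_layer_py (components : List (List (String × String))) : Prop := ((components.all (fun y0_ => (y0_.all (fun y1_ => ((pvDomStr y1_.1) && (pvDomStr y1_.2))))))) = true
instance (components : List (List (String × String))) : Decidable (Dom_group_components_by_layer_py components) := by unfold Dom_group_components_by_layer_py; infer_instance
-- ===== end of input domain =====

-- B replaces A's single-pass dict-of-buckets with a keyword TABLE driving a classifier,
-- building the output per layer by filtering; objective: alternative (table-driven, not faster).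

-- ===== PORT A =====
def group_components_by_layer_py (components : List (List (String × String))) : List (String × List (List (String × String))) :=
  let layers : PySem.Dict String (List (List (String × String))) :=
    PySem.Dict.ofList [("Frontend", []), ("Backend", []), ("Database", []), ("Storage", []),
                       ("Network", []), ("Security", []), ("Other", [])]
  let layers := components.foldl (fun layers comp =>
    let comp_type := PySem.Str.lower ((PySem.Dict.ofList comp).getD "type" "")
    let _layer := PySem.Str.lower ((PySem.Dict.ofList comp).getD "layer" "")
    if PySem.Str.isIn "frontend" comp_type || PySem.Str.isIn "web" comp_type || PySem.Str.isIn "ui" comp_type then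
      layers.modify "Frontend" [] (fun l => l ++ [comp])
    else if PySem.Str.isIn "backend" comp_type || PySem.Str.isIn "api" comp_type || PySem.Str.isIn "service" comp_type then
      layers.modify "Backend" [] (fun l => l ++ [comp])
    else if PySem.Str.isIn "database" comp_type || PySem.Str.isIn "db" comp_type || PySem.Str.isIn "data" comp_type then
      layers.modify "Database" [] (fun l => l ++ [comp])
    else if PySem.Str.isIn "storage" comp_type || PySem.Str.isIn "file" comp_type || PySem.Str.isIn "blob" comp_type then
      layers.modify "Storage" [] (fun l => l ++ [comp])
    else if PySem.Str.isIn "network" comp_type || PySem.Str.isIn "load" comp_type || PySem.Str.isIn "gateway" comp_type then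
      layers.modify "Network" [] (fun l => l ++ [comp])
    else if PySem.Str.isIn "security" comp_type || PySem.Str.isIn "auth" comp_type || PySem.Str.isIn "firewall" comp_type then
      layers.modify "Security" [] (fun l => l ++ [comp])
    else
      layers.modify "Other" [] (fun l => l ++ [comp])) layers
  layers.items.filter (fun kv => !kv.2.isEmpty)

-- ===== PORT B =====
def pvLayerTable : List (String × List String) :=
  [("Frontend", ["frontend", "web", "ui"]),
   ("Backend", ["backend", "api", "service"]),
   ("Database", ["database", "db", "data"]),
   ("Storage", ["storage", "file", "blob"]),
   ("Network", ["network", "load", "gateway"]),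
   ("Security", ["security", "auth", "firewall"])]

def pvClassifyGo (t : String) : List (String × List String) → String
  | [] => "Other"
  | (name, kws) :: rest => if kws.any (fun k => PySem.Str.isIn k t) then name else pvClassifyGo t rest

def pvClassify (comp : List (String × String)) : String :=
  pvClassifyGo (PySem.Str.lower ((PySem.Dict.ofList comp).getD "type" "")) pvLayerTable

def group_components_by_layer_py_alt (components : List (List (String × String))) : List (String × List (List (String × String))) :=
  (pvLayerTable.map Prod.fst ++ ["Other"]).foldl (fun res name =>
    let bucket := components.filter (fun c => pvClassify c == name)
    if bucket.isEmpty then res else res ++ [(name, bucket)]) []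

-- ===== PRECONDITION & SPEC =====
def Spec_group_components_by_layer_py (components : List (List (String × String))) (out : List (String × List (List (String × String)))) : Prop := out = group_components_by_layer_py_alt components
instance (components : List (List (String × String))) (out : List (String × List (List (String × String)))) : Decidable (Spec_group_components_by_layer_py components out) := by unfold Spec_group_components_by_layer_py; infer_instance

-- ===== CLAIM (what is proved, stated in full; the proofs are below) =====
def Claim_equal_group_components_by_layer_py : Prop := ∀ (components : List (List (String × String))), Dom_group_components_by_layer_py components → Spec_group_components_by_layer_py components (group_components_by_layer_py components)

-- ===== LEMMAS AND PROOFS =====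

-- the seven layer names, in order
def pvKeys : List String := pvLayerTable.map Prod.fst ++ ["Other"]

-- A's loop body equals "modify the classified bucket"
def pvStepA (d : PySem.Dict String (List (List (String × String)))) (comp : List (String × String)) : PySem.Dict String (List (List (String × String))) :=
  d.modify (pvClassify comp) [] (fun l => l ++ [comp])

theorem stepA_eq :
    (fun (layers : PySem.Dict String (List (List (String × String)))) (comp : List (String × String)) =>
      let comp_type := PySem.Str.lower ((PySem.Dict.ofList comp).getD "type" "")
      let _layer := PySem.Str.lower ((PySem.Dict.ofList comp).getD "layer" "")
      if PySem.Str.isIn "frontend" comp_type || PySem.Str.isIn "web" comp_type || PySem.Str.isIn "ui" comp_type then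
        layers.modify "Frontend" [] (fun l => l ++ [comp])
      else if PySem.Str.isIn "backend" comp_type || PySem.Str.isIn "api" comp_type || PySem.Str.isIn "service" comp_type then
        layers.modify "Backend" [] (fun l => l ++ [comp])
      else if PySem.Str.isIn "database" comp_type || PySem.Str.isIn "db" comp_type || PySem.Str.isIn "data" comp_type then
        layers.modify "Database" [] (fun l => l ++ [comp])
      else if PySem.Str.isIn "storage" comp_type || PySem.Str.isIn "file" comp_type || PySem.Str.isIn "blob" comp_type then
        layers.modify "Storage" [] (fun l => l ++ [comp])
      else if PySem.Str.isIn "network" comp_type || PySem.Str.isIn "load" comp_type || PySem.Str.isIn "gateway" comp_type then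
        layers.modify "Network" [] (fun l => l ++ [comp])
      else if PySem.Str.isIn "security" comp_type || PySem.Str.isIn "auth" comp_type || PySem.Str.isIn "firewall" comp_type then
        layers.modify "Security" [] (fun l => l ++ [comp])
      else
        layers.modify "Other" [] (fun l => l ++ [comp])) = pvStepA := by
  funext d comp
  show _ = d.modify (pvClassify comp) [] (fun l => l ++ [comp])
  simp only [pvClassify, pvLayerTable, pvClassifyGo, List.any_cons, List.any_nil,
    Bool.or_false, Bool.or_assoc]
  split_ifs <;> rfl

theorem classify_mem_keys (comp : List (String × String)) : pvClassify comp ∈ pvKeys := by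
  simp only [pvClassify, pvKeys, pvLayerTable, pvClassifyGo, List.map]
  split_ifs <;> simp

theorem keys_nodup : pvKeys.Nodup := by decide

-- invariant: folding pvStepA over cs extends each bucket by the matching filter
theorem foldl_stepA_items (cs : List (List (String × String)))
    (f : String → List (List (String × String)))
    (d : PySem.Dict String (List (List (String × String))))
    (hd : d.items = pvKeys.map (fun k => (k, f k))) :
    (cs.foldl pvStepA d).items =
      pvKeys.map (fun k => (k, f k ++ cs.filter (fun c => pvClassify c == k))) := by
  induction cs generalizing f d with
  | nil => simpa using hd
  | cons c cs ih =>
    have hkeys : d.keys = pvKeys := by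
      simp only [PySem.Dict.keys, hd, List.map_map]
      simp [Function.comp_def]
    have hcont : d.contains (pvClassify c) = true := by
      rw [PySem.Dict.contains_iff_mem_keys, hkeys]; exact classify_mem_keys c
    have hget : d.getD (pvClassify c) [] = f (pvClassify c) := by
      refine PySem.Dict.getD_of_mem_items d ?_ ?_ []
      · rw [hd]
        exact List.mem_map_of_mem (classify_mem_keys c)
      · rw [show d.keys = pvKeys from hkeys]; exact keys_nodup
    have hstep : (pvStepA d c).items =
        pvKeys.map (fun k => (k, if k = pvClassify c then f k ++ [c] else f k)) := by
      unfold pvStepA PySem.Dict.modify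
      rw [PySem.Dict.items_insert, if_pos hcont, hget, hd, List.map_map]
      refine List.map_congr_left ?_
      intro k _
      by_cases hk : k = pvClassify c <;> simp [hk]
    rw [List.foldl_cons, ih (fun k => if k = pvClassify c then f k ++ [c] else f k) _ hstep]
    refine List.map_congr_left ?_
    intro k _
    by_cases hk : pvClassify c = k
    · simp [hk]
    · have hk' : ¬ k = pvClassify c := fun h => hk h.symm
      simp [hk, hk']

-- B's fold is the filtered map
theorem foldl_B (components : List (List (String × String))) (names : List String)
    (acc : List (String × List (List (String × String)))) :
    names.foldl (fun res name =>
      let bucket := components.filter (fun c => pvClassify c == name)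
      if bucket.isEmpty then res else res ++ [(name, bucket)]) acc =
    acc ++ (names.map (fun k => (k, components.filter (fun c => pvClassify c == k)))).filter
      (fun kv => !kv.2.isEmpty) := by
  induction names generalizing acc with
  | nil => simp
  | cons n rest ih =>
    simp only [List.foldl_cons, List.map_cons, List.filter_cons]
    rw [ih]
    by_cases h : (components.filter (fun c => pvClassify c == n)).isEmpty
    · simp [List.isEmpty_iff.mp h]
    · simp only [h]
      simp

-- ===== VERDICT (by name: the statement is the Claim_ definition above) =====
theorem group_components_by_layer_py_spec : Claim_equal_group_components_by_layer_py := by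
  intro components _
  unfold Spec_group_components_by_layer_py
  unfold group_components_by_layer_py group_components_by_layer_py_alt
  dsimp only []
  rw [stepA_eq]
  rw [foldl_stepA_items components (fun _ => []) _ (by decide)]
  rw [show (pvLayerTable.map Prod.fst ++ ["Other"]) = pvKeys from rfl, foldl_B]
  simp
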